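-- pv_equiv track=rewrite | github.com/mox3r/gb_prog_ex | Python_ex/Codewars/Reverse sublists of even numbers/prog.py | rev_sub
-- ===== SOURCE A (Python) =====
-- def rev_sub(arr):
--     res, tmp = [], []
--     for x in arr:
--         if x % 2:
--             res = res + tmp + [x]
--             tmp = []
--         else:
--             tmp = [x] + tmp
--     return res + tmp
-- ===== SOURCE B (Python) =====
-- from itertools import groupby
--
-- def rev_sub(arr):
--     out = []
--     for is_even, grp in groupby(arr, key=lambda x: x % 2 == 0):
--         g = list(grp)
--         if is_even:
--             g.reverse()
--         out += g
--     return out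
-- ===== Notes on version B (the rewrite author's own statement) =====
-- stated objective: idiomatic
-- what changed: Replaced the hand-threaded reversed buffer accumulator with itertools.groupby over the parity key: split the list into parity runs first, reverse each even run, and concatenate.
import Mathlib
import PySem

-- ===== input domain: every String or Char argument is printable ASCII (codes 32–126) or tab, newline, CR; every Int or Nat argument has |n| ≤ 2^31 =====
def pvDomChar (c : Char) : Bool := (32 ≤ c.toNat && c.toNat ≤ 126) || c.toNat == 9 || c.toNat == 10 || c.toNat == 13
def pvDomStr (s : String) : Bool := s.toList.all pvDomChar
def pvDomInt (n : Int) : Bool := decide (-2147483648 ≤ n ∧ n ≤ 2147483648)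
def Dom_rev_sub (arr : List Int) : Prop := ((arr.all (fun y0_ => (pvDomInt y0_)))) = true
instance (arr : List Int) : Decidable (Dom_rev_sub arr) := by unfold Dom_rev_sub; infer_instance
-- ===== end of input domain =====

-- B reverses each maximal run of consecutive even numbers by splitting the list
-- into parity runs first (groupby) instead of threading a reversed buffer.

-- ===== PORT A =====
-- literal port of A: fold over arr with state (res, tmp); odd x flushes tmp, even x prepends to tmp
def rev_sub (arr : List Int) : List Int :=
  let st := arr.foldl
    (fun (st : List Int × List Int) x =>
      if PySem.Int.mod x 2 ≠ 0 then (st.1 ++ st.2 ++ [x], []) else (st.1, [x] ++ st.2))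
    ([], [])
  st.1 ++ st.2

-- ===== PORT B =====
-- the groupby key of Source B: x % 2 == 0
def pvEvn (y : Int) : Bool := PySem.Int.mod y 2 == 0

-- groupby over the parity key: take the maximal run sharing the head's key,
-- reverse it when the key is "even", and continue on the rest
def rev_sub_alt : List Int → List Int
  | [] => []
  | x :: xs =>
    if pvEvn x then
      (x :: xs.takeWhile pvEvn).reverse ++ rev_sub_alt (xs.dropWhile pvEvn)
    else
      (x :: xs.takeWhile (fun y => !pvEvn y)) ++ rev_sub_alt (xs.dropWhile (fun y => !pvEvn y))
termination_by xs => xs.length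
decreasing_by
  · exact Nat.lt_succ_of_le (xs.length_dropWhile_le _)
  · exact Nat.lt_succ_of_le (xs.length_dropWhile_le _)

-- ===== PRECONDITION & SPEC =====
def Spec_rev_sub (arr : List Int) (out : List Int) : Prop := out = rev_sub_alt arr
instance (arr : List Int) (out : List Int) : Decidable (Spec_rev_sub arr out) := by unfold Spec_rev_sub; infer_instance

-- ===== CLAIM (what is proved, stated in full; the proofs are below) =====
def Claim_equal_rev_sub : Prop := ∀ (arr : List Int), Dom_rev_sub arr → Spec_rev_sub arr (rev_sub arr)

-- ===== LEMMAS AND PROOFS =====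

-- A's loop, with tmp abstracted out: consume evens into tmp, flush tmp before each odd
def pvBridge (tmp : List Int) : List Int → List Int
  | [] => tmp
  | x :: xs => if pvEvn x then pvBridge (x :: tmp) xs else tmp ++ x :: pvBridge [] xs

theorem pvBridge_nil (tmp : List Int) : pvBridge tmp [] = tmp := rfl

theorem pvBridge_cons (tmp : List Int) (x : Int) (xs : List Int) :
    pvBridge tmp (x :: xs) =
      if pvEvn x then pvBridge (x :: tmp) xs else tmp ++ x :: pvBridge [] xs := rfl

-- A's fold equals res ++ pvBridge tmp xs
theorem pvLoopA_eq (xs : List Int) : ∀ (res tmp : List Int),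
    (xs.foldl
      (fun (st : List Int × List Int) x =>
        if PySem.Int.mod x 2 ≠ 0 then (st.1 ++ st.2 ++ [x], []) else (st.1, [x] ++ st.2))
      (res, tmp)).1 ++
    (xs.foldl
      (fun (st : List Int × List Int) x =>
        if PySem.Int.mod x 2 ≠ 0 then (st.1 ++ st.2 ++ [x], []) else (st.1, [x] ++ st.2))
      (res, tmp)).2
    = res ++ pvBridge tmp xs := by
  induction xs with
  | nil => intro res tmp; simp [pvBridge_nil]
  | cons x xs ih =>
    intro res tmp
    by_cases h : pvEvn x
    · have h' : ¬ PySem.Int.mod x 2 ≠ 0 := by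
        simp [pvEvn] at h; simp [h]
      simp only [List.foldl_cons, if_neg h', pvBridge_cons, if_pos h]
      exact ih res (x :: tmp)
    · have h' : PySem.Int.mod x 2 ≠ 0 := by
        simp [pvEvn] at h; simpa using h
      simp only [List.foldl_cons, if_pos h', pvBridge_cons, if_neg h]
      rw [ih (res ++ tmp ++ [x]) []]
      simp

-- pvBridge through an even run: evens are prepended to tmp
theorem pvBridge_even_run (xs : List Int) : ∀ (tmp : List Int),
    pvBridge tmp xs = (xs.takeWhile pvEvn).reverse ++ tmp ++ pvBridge [] (xs.dropWhile pvEvn) := by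
  induction xs with
  | nil => intro tmp; simp [pvBridge_nil]
  | cons x xs ih =>
    intro tmp
    by_cases h : pvEvn x
    · rw [pvBridge_cons, if_pos h, ih (x :: tmp),
        List.takeWhile_cons_of_pos h, List.dropWhile_cons_of_pos h]
      simp
    · rw [pvBridge_cons, if_neg h,
        List.takeWhile_cons_of_neg h, List.dropWhile_cons_of_neg h,
        pvBridge_cons, if_neg h]
      simp

-- pvBridge through an odd run: odds pass through unchanged
theorem pvBridge_odd_run (xs : List Int) :
    pvBridge [] xs = xs.takeWhile (fun y => !pvEvn y) ++ pvBridge [] (xs.dropWhile (fun y => !pvEvn y)) := by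
  induction xs with
  | nil => simp [pvBridge_nil]
  | cons x xs ih =>
    by_cases h : pvEvn x
    · simp [h]
    · rw [pvBridge_cons, if_neg h]
      simp [h, ih]

-- pvBridge with empty tmp is exactly B's groupby recursion
theorem pvBridge_eq_alt (xs : List Int) : pvBridge [] xs = rev_sub_alt xs := by
  induction hn : xs.length using Nat.strong_induction_on generalizing xs with
  | _ n ih =>
  match xs with
  | [] => simp [pvBridge_nil, rev_sub_alt]
  | x :: xs =>
    by_cases h : pvEvn x
    · rw [pvBridge_cons, if_pos h, pvBridge_even_run,
        rev_sub_alt, if_pos h]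
      have hrec := ih (xs.dropWhile pvEvn).length
        (by subst hn; simpa using Nat.lt_succ_of_le (xs.length_dropWhile_le _))
        (xs.dropWhile pvEvn) rfl
      rw [hrec]; simp
    · rw [pvBridge_cons, if_neg h, pvBridge_odd_run,
        rev_sub_alt, if_neg h]
      have hrec := ih (xs.dropWhile (fun y => !pvEvn y)).length
        (by subst hn; simpa using Nat.lt_succ_of_le (xs.length_dropWhile_le _))
        (xs.dropWhile (fun y => !pvEvn y)) rfl
      rw [hrec]; simp

-- ===== VERDICT (by name: the statement is the Claim_ definition above) =====
theorem rev_sub_spec : Claim_equal_rev_sub := by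
  intro arr _
  unfold Spec_rev_sub rev_sub
  rw [pvLoopA_eq arr [] []]
  simpa using pvBridge_eq_alt arr
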